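-- pv_equiv track=rewrite | github.com/Anne4188/invoice-ai-system | src/evaluation/eval_retrieval_ab.py | build_relevance_same_merchant
-- ===== SOURCE A (Python) =====
-- from typing import Dict, Any, List, Set
--
-- def build_relevance_same_merchant(merchants: List[str]) -> List[Set[int]]:
--     """
--     relevant(i) = invoices with same (non-empty) merchant, excluding self.
--     IMPORTANT: empty merchant should NOT be grouped together.
--     """
--     inv: Dict[str, List[int]] = {}
--     for i, m in enumerate(merchants):
--         m = (m or "").strip()
--         if not m:
--             continue
--         inv.setdefault(m, []).append(i)
--
--     rels: List[Set[int]] = []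
--     for i, m in enumerate(merchants):
--         m = (m or "").strip()
--         if not m:
--             rels.append(set())
--             continue
--         cands = set(inv.get(m, []))
--         cands.discard(i)
--         rels.append(cands if cands else set())
--     return rels
-- ===== SOURCE B (Python) =====
-- from typing import List, Set
--
--
-- def build_relevance_same_merchant(merchants: List[str]) -> List[Set[int]]:
--     """No index structure at all: compare every pair of normalized merchants directly."""
--     norms = [(m or "").strip() for m in merchants]
--     return [set() if not m
--             else {j for j, x in enumerate(norms) if x == m and j != i}
--             for i, m in enumerate(norms)]
-- ===== Notes on version B (the rewrite author's own statement) =====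
-- stated objective: simpler
-- what changed: A's hash index (dict of merchant->indices built in a first pass, then looked up per invoice) is removed entirely: B normalizes once and answers each invoice by a direct pairwise scan over the normalized list, a two-line comprehension with no auxiliary grouping structure.
import Mathlib
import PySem

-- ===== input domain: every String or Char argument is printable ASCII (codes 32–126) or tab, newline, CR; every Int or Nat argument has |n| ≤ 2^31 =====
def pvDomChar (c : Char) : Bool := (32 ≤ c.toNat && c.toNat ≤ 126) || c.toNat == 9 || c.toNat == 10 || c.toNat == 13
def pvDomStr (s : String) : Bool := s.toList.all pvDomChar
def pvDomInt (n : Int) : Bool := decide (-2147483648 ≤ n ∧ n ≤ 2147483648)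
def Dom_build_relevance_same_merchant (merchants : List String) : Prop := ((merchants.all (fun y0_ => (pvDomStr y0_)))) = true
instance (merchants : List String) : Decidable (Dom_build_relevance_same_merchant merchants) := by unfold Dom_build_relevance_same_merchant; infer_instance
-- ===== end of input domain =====

-- B drops A's merchant->indices dict entirely: it normalizes once and answers each invoice
-- by a direct pairwise scan over the normalized list (simpler, no auxiliary index; not faster).

-- ===== PORT A =====
def build_relevance_same_merchant (merchants : List String) : List (List Int) :=
  let inv : PySem.Dict String (List Int) :=
    (PySem.List.enumerate merchants 0).foldl
      (fun d p =>
        let m := PySem.Str.strip p.2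
        if m = "" then d else d.modify m [] (fun l => l ++ [p.1]))
      PySem.Dict.empty
  (PySem.List.enumerate merchants 0).foldl
    (fun rels p =>
      let m := PySem.Str.strip p.2
      if m = "" then rels ++ [([] : List Int)]
      else
        let cands := PySem.Set.discard (PySem.Set.ofList (inv.getD m [])) p.1
        rels ++ [if cands = [] then ([] : List Int) else cands])
    []

-- ===== PORT B =====
def build_relevance_same_merchant_alt (merchants : List String) : List (List Int) :=
  let norms := merchants.map (fun m => PySem.Str.strip m)
  (PySem.List.enumerate norms 0).map (fun p =>
    if p.2 = "" then ([] : List Int)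
    else PySem.Set.ofList
      (((PySem.List.enumerate norms 0).filter
          (fun q => q.2 == p.2 && q.1 != p.1)).map (·.1)))

-- ===== PRECONDITION & SPEC =====
def Spec_build_relevance_same_merchant (merchants : List String) (out : List (List Int)) : Prop := out = build_relevance_same_merchant_alt merchants
instance (merchants : List String) (out : List (List Int)) : Decidable (Spec_build_relevance_same_merchant merchants out) := by unfold Spec_build_relevance_same_merchant; infer_instance

-- ===== CLAIM (what is proved, stated in full; the proofs are below) =====
def Claim_equal_build_relevance_same_merchant : Prop := ∀ (merchants : List String), Dom_build_relevance_same_merchant merchants → Spec_build_relevance_same_merchant merchants (build_relevance_same_merchant merchants)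

-- ===== LEMMAS AND PROOFS =====

-- A's first pass (the dict-building loop), and the group of a merchant string
def pvStep (d : PySem.Dict String (List Int)) (p : Int × String) : PySem.Dict String (List Int) :=
  if PySem.Str.strip p.2 = "" then d else d.modify (PySem.Str.strip p.2) [] (fun l => l ++ [p.1])

def pvGrp (l : List (Int × String)) (c : String) : List Int :=
  (l.filter (fun p => PySem.Str.strip p.2 == c)).map (·.1)

lemma pv_getD_fold (l : List (Int × String)) (d : PySem.Dict String (List Int)) (c : String)
    (hc : c ≠ "") :
    (l.foldl pvStep d).getD c [] = d.getD c [] ++ pvGrp l c := by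
  induction l generalizing d with
  | nil => simp [pvGrp]
  | cons p t ih =>
    simp only [List.foldl_cons]
    by_cases h : PySem.Str.strip p.2 = ""
    · have hb : (PySem.Str.strip p.2 == c) = false := by
        simp only [beq_eq_false_iff_ne, ne_eq, h]
        exact Ne.symm hc
      rw [show pvStep d p = d from by simp [pvStep, h]]
      rw [ih d]
      congr 1
      simp [pvGrp, hb]
    · rw [show pvStep d p = d.modify (PySem.Str.strip p.2) [] (fun l => l ++ [p.1]) from by
        simp [pvStep, h]]
      rw [ih]
      rw [PySem.Dict.getD_modify]
      by_cases hec : PySem.Str.strip p.2 = c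
      · rw [if_pos hec.symm]
        simp [pvGrp, hec, List.append_assoc]
      · have : ¬ (c = PySem.Str.strip p.2) := fun hh => hec hh.symm
        simp [pvGrp, hec, this]

lemma pv_A_fold (inv : PySem.Dict String (List Int)) (l : List (Int × String))
    (a : List (List Int)) :
    l.foldl (fun rels p =>
        let m := PySem.Str.strip p.2
        if m = "" then rels ++ [([] : List Int)]
        else
          let cands := PySem.Set.discard (PySem.Set.ofList (inv.getD m [])) p.1
          rels ++ [if cands = [] then ([] : List Int) else cands]) a
      = a ++ l.map (fun p =>
          if PySem.Str.strip p.2 = "" then ([] : List Int)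
          else PySem.Set.discard (PySem.Set.ofList (inv.getD (PySem.Str.strip p.2) [])) p.1) := by
  induction l generalizing a with
  | nil => simp
  | cons p t ih =>
    simp only [List.foldl_cons, List.map_cons]
    rw [ih]
    by_cases h : PySem.Str.strip p.2 = ""
    · simp [h]
    · have hcoll : (if PySem.Set.discard (PySem.Set.ofList (inv.getD (PySem.Str.strip p.2) [])) p.1 = []
          then ([] : List Int)
          else PySem.Set.discard (PySem.Set.ofList (inv.getD (PySem.Str.strip p.2) [])) p.1)
          = PySem.Set.discard (PySem.Set.ofList (inv.getD (PySem.Str.strip p.2) [])) p.1 := by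
        split_ifs with hc
        · exact hc.symm
        · rfl
      simp [h, hcoll]

lemma pv_A_eq (merchants : List String) :
    build_relevance_same_merchant merchants
      = (PySem.List.enumerate merchants 0).map (fun p =>
          if PySem.Str.strip p.2 = "" then ([] : List Int)
          else PySem.Set.discard (PySem.Set.ofList
            (((PySem.List.enumerate merchants 0).foldl pvStep PySem.Dict.empty).getD
              (PySem.Str.strip p.2) [])) p.1) := by
  exact (pv_A_fold ((PySem.List.enumerate merchants 0).foldl pvStep PySem.Dict.empty)
      (PySem.List.enumerate merchants 0) []).trans (List.nil_append _)

lemma pv_discard_filter (s : PySem.Set Int) (x : Int) :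
    PySem.Set.discard s x = s.filter (fun y => y != x) := by
  unfold PySem.Set.discard
  apply List.filter_congr
  intro y _
  by_cases h : y = x <;> simp [h, bne]

lemma pv_grp_nodup (xs : List String) (c : String) :
    (pvGrp (PySem.List.enumerate xs 0) c).Nodup := by
  unfold pvGrp
  have hpw : ((PySem.List.enumerate xs 0).filter
      (fun p => PySem.Str.strip p.2 == c)).Pairwise (fun p q => p.1 < q.1) :=
    List.Pairwise.filter _ (PySem.List.pairwise_lt_enumerate xs 0)
  have : ((((PySem.List.enumerate xs 0)).filter
      (fun p => PySem.Str.strip p.2 == c)).map (·.1)).Pairwise (· < ·) :=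
    List.Pairwise.map _ (fun _ _ h => h) hpw
  exact List.Pairwise.imp (fun h => Int.ne_of_lt h) this

lemma pv_enumerate_map {α β : Type} (f : α → β) (xs : List α) (s : Int) :
    PySem.List.enumerate (xs.map f) s
      = (PySem.List.enumerate xs s).map (fun p => (p.1, f p.2)) := by
  induction xs generalizing s with
  | nil => simp
  | cons x t ih => simp [PySem.List.enumerate_cons, ih]

-- B's comprehension at one index equals A's group with the index filtered out
lemma pv_B_entry (merchants : List String) (c : String) (k : Int) :
    (((PySem.List.enumerate merchants 0).map (fun p => (p.1, PySem.Str.strip p.2))).filter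
        (fun q => q.2 == c && q.1 != k)).map (·.1)
      = (pvGrp (PySem.List.enumerate merchants 0) c).filter (fun y => y != k) := by
  unfold pvGrp
  rw [List.filter_map]
  induction PySem.List.enumerate merchants 0 with
  | nil => rfl
  | cons p t ih =>
    simp only [List.filter_cons]
    by_cases h1 : (PySem.Str.strip p.2 == c) = true
    · by_cases h2 : (p.1 != k) = true <;> simp [h1, h2, ih]
    · simp [h1, ih]

-- ===== VERDICT (by name: the statement is the Claim_ definition above) =====
theorem build_relevance_same_merchant_spec : Claim_equal_build_relevance_same_merchant := by
  intro merchants _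
  unfold Spec_build_relevance_same_merchant
  simp only [build_relevance_same_merchant_alt]
  rw [pv_A_eq, pv_enumerate_map, List.map_map]
  apply List.map_congr_left
  intro p hp
  obtain ⟨j, hj, rfl⟩ := (PySem.List.mem_enumerate_iff _ _ _).mp hp
  simp only [Function.comp]
  by_cases hs : PySem.Str.strip merchants[j] = ""
  · simp [hs]
  · rw [if_neg hs, if_neg hs]
    rw [pv_getD_fold _ _ _ hs]
    rw [PySem.Dict.getD_empty, List.nil_append]
    rw [pv_B_entry]
    rw [PySem.Set.ofList_eq_self_of_nodup _
      (pv_grp_nodup merchants (PySem.Str.strip merchants[j]))]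
    rw [PySem.Set.ofList_eq_self_of_nodup _
      (List.Nodup.filter _ (pv_grp_nodup merchants (PySem.Str.strip merchants[j])))]
    rw [pv_discard_filter]
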